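-- pv_equiv track=rewrite | github.com/laurensent/ankimd | highlighter.py | _find_string_end
-- ===== SOURCE A (Python) =====
-- def _find_string_end(code: str, start: int, quote: str, length: int) -> int:
--     """Find the end of a string literal."""
--     i = start + 1
--     while i < length:
--         if code[i] == '\\' and i + 1 < length:
--             i += 2
--         elif code[i] == quote:
--             return i + 1
--         else:
--             i += 1
--     return length
-- ===== SOURCE B (Python) =====
-- def _find_string_end(code: str, start: int, quote: str, length: int) -> int:
--     """Find the end of a string literal, jumping between escapes with str.find."""
--     i = start + 1
--     while i < length:
--         q = code.find(quote, i, length)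
--         b = code.find('\\', i, length)
--         if q != -1 and (b == -1 or q < b):
--             return q + 1
--         if b == -1:
--             return length
--         i = b + 2
--     return length
-- ===== Notes on version B (the rewrite author's own statement) =====
-- stated objective: faster
-- what changed: Replaces A's character-by-character while-loop with str.find(sub, i, length) jumps (next quote / next backslash in the remaining window), returning at an unescaped quote or hopping over each escape pair; Pre_ excludes start < -1 (A then reads via negative-index wraparound), length > len(code) (A raises IndexError), and the degenerate corner of a non-single-character quote that actually occurs in the scanned slice, where A's one-character comparison can never match (it returns length) while B's substring search finds it - both defensible outside the function's natural domain.
-- outside the precondition, e.g. on _find_string_end("''x''", 0, "''", 5): A returns 5, B returns 4; on _find_string_end('ab"', -3, '"', 3): A returns 0, B returns 3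
import Mathlib
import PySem

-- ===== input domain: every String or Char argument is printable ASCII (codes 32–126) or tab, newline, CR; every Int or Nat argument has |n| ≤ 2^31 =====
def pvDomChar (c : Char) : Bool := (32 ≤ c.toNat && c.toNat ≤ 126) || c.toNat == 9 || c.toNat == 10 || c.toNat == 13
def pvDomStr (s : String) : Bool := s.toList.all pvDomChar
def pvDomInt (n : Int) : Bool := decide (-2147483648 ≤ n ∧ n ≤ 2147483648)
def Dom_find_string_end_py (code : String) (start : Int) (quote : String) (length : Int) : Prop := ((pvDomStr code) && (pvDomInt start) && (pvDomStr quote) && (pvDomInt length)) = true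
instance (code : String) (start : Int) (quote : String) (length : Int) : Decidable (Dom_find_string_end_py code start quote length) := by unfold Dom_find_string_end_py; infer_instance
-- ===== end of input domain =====

-- B scans with str.find jumps (next quote / next backslash inside [i, length)) instead of
-- A's per-character loop; equivalence on Pre_ is proved below.

-- ===== PORT A =====
def pvLoopA (cs : List Char) (quote : String) (L : Int) : Nat → Int → Int
  | 0, _i => L
  | fuel + 1, i =>
    if i < L then
      match PySem.List.pyGet? cs i with
      | some c =>
        if c = '\\' ∧ i + 1 < L then pvLoopA cs quote L fuel (i + 2)
        else if String.singleton c = quote then i + 1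
        else pvLoopA cs quote L fuel (i + 1)
      | none => L   -- Python raises IndexError here; excluded by Pre_
    else L

def find_string_end_py (code : String) (start : Int) (quote : String) (length : Int) : Int :=
  pvLoopA code.toList quote length (length - (start + 1)).toNat (start + 1)

-- ===== PORT B =====
def pvLoopB (code : String) (quote : String) (L : Int) : Nat → Int → Int
  | 0, _i => L
  | fuel + 1, i =>
    if i < L then
      if PySem.Str.findFrom code quote i (some L) ≠ -1 ∧
          (PySem.Str.findFrom code "\\" i (some L) = -1 ∨
           PySem.Str.findFrom code quote i (some L) < PySem.Str.findFrom code "\\" i (some L)) then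
        PySem.Str.findFrom code quote i (some L) + 1
      else if PySem.Str.findFrom code "\\" i (some L) = -1 then L
      else pvLoopB code quote L fuel (PySem.Str.findFrom code "\\" i (some L) + 2)
    else L

def find_string_end_py_alt (code : String) (start : Int) (quote : String) (length : Int) : Int :=
  pvLoopB code quote length (length - (start + 1)).toNat (start + 1)

-- ===== PRECONDITION & SPEC =====
-- Pre_ keeps A's non-raising inputs minus two defensible corners: start < -1 (A then reads
-- code[i] through Python's negative-index wraparound) and length > len(code) (A raises
-- IndexError); and, for a quote that is not a single character (which A's one-character
-- comparison can never match), the degenerate case where that quote string actually occurs in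
-- the scanned slice — there A's value (length) and B's (just past the multi-char quote) are
-- both defensible readings of an input outside the function's natural domain.
def Pre_find_string_end_py (code : String) (start : Int) (quote : String) (length : Int) : Prop :=
  -1 ≤ start ∧ length ≤ PySem.Str.len code ∧
    (PySem.Str.len quote = 1 ∨
      ¬ quote.toList <:+: ((code.toList.take length.toNat).drop (start + 1).toNat))
instance (code : String) (start : Int) (quote : String) (length : Int) : Decidable (Pre_find_string_end_py code start quote length) := by unfold Pre_find_string_end_py; infer_instance

def pvWitness_find_string_end_py : String × Int × String × Int := ("ab", 0, "'", 2)

def Spec_find_string_end_py (code : String) (start : Int) (quote : String) (length : Int) (out : Int) : Prop := out = find_string_end_py_alt code start quote length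
instance (code : String) (start : Int) (quote : String) (length : Int) (out : Int) : Decidable (Spec_find_string_end_py code start quote length out) := by unfold Spec_find_string_end_py; infer_instance

-- ===== CLAIM (what is proved, stated in full; the proofs are below) =====
def Claim_equal_find_string_end_py : Prop := ∀ (code : String) (start : Int) (quote : String) (length : Int), Dom_find_string_end_py code start quote length → Pre_find_string_end_py code start quote length → Spec_find_string_end_py code start quote length (find_string_end_py code start quote length)

-- ===== LEMMAS AND PROOFS =====

-- proof-side copies of the two loops without fuel (well-founded on L - i)
theorem pvFindFrom_some_ge (s sub : List Char) (i e : Int)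
    (h : PySem.Chars.findFrom s sub i (some e) ≠ -1) :
    i ≤ PySem.Chars.findFrom s sub i (some e) ∨
      (i < 0 ∧ 0 ≤ PySem.Chars.findFrom s sub i (some e)) := by
  unfold PySem.Chars.findFrom at h ⊢
  dsimp only at h ⊢
  set st := (if i < 0 then if i + (s.length : Int) < 0 then 0 else i + (s.length : Int) else i) with hst
  have h1 : i ≤ st ∨ (0 ≤ st ∧ i < 0) := by rw [hst]; split_ifs <;> omega
  set e' := (if (s.length : Int) < e then (s.length : Int) else if e < 0 then if e + (s.length : Int) < 0 then 0 else e + (s.length : Int) else e) with he'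
  have h2 := PySem.Chars.neg_one_le_find (List.drop st.toNat (List.take e'.toNat s)) sub
  split_ifs at h ⊢ <;> omega

def pvRunA (cs : List Char) (quote : String) (L : Int) (i : Int) : Int :=
  if _h : i < L then
    match PySem.List.pyGet? cs i with
    | some c =>
      if c = '\\' ∧ i + 1 < L then pvRunA cs quote L (i + 2)
      else if String.singleton c = quote then i + 1
      else pvRunA cs quote L (i + 1)
    | none => L
  else L
termination_by (L - i).toNat
decreasing_by all_goals omega

def pvRunB (code : String) (quote : String) (L : Int) (i : Int) : Int :=
  if _h : i < L then
    if PySem.Str.findFrom code quote i (some L) ≠ -1 ∧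
        (PySem.Str.findFrom code "\\" i (some L) = -1 ∨
         PySem.Str.findFrom code quote i (some L) < PySem.Str.findFrom code "\\" i (some L)) then
      PySem.Str.findFrom code quote i (some L) + 1
    else if hb : PySem.Str.findFrom code "\\" i (some L) = -1 then L
    else pvRunB code quote L (PySem.Str.findFrom code "\\" i (some L) + 2)
  else L
termination_by (L - i).toNat
decreasing_by
  rw [PySem.Str.findFrom_eq] at hb ⊢
  rcases pvFindFrom_some_ge code.toList ("\\").toList i L hb with h | h <;> omega

-- the fuel loops compute the WF loops once the fuel covers the remaining window
theorem pvLoopA_eq_run (cs : List Char) (quote : String) (L : Int) :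
    ∀ (f : Nat) (i : Int), (L - i).toNat ≤ f →
      pvLoopA cs quote L f i = pvRunA cs quote L i := by
  intro f
  induction f with
  | zero =>
    intro i h
    rw [pvRunA, dif_neg (by omega : ¬ i < L)]
    rfl
  | succ f ih =>
    intro i h
    by_cases hiL : i < L
    · rw [pvRunA, dif_pos hiL]
      show (if i < L then _ else L) = _
      rw [if_pos hiL]
      cases hget : PySem.List.pyGet? cs i with
      | none => rfl
      | some c =>
        dsimp only
        split_ifs with h1 h2
        · exact ih (i + 2) (by omega)
        · rfl
        · exact ih (i + 1) (by omega)
    · rw [pvRunA, dif_neg hiL]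
      show (if i < L then _ else L) = _
      rw [if_neg hiL]

theorem pvLoopB_eq_run (code : String) (quote : String) (L : Int) :
    ∀ (f : Nat) (i : Int), (L - i).toNat ≤ f →
      pvLoopB code quote L f i = pvRunB code quote L i := by
  intro f
  induction f with
  | zero =>
    intro i h
    rw [pvRunB, dif_neg (by omega : ¬ i < L)]
    rfl
  | succ f ih =>
    intro i h
    by_cases hiL : i < L
    · rw [pvRunB, dif_pos hiL]
      show (if i < L then _ else L) = _
      rw [if_pos hiL]
      split_ifs with h1 h2
      · rfl
      · rfl
      · refine ih _ ?_
        have := pvFindFrom_some_ge code.toList quote.toList i L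
        rw [PySem.Str.findFrom_eq] at h2 ⊢
        rcases pvFindFrom_some_ge code.toList ("\\").toList i L h2 with hg | hg <;> omega
    · rw [pvRunB, dif_neg hiL]
      show (if i < L then _ else L) = _
      rw [if_neg hiL]

-- singleton prefix/infix characterisations
theorem pvSingleton_prefix_drop (cs : List Char) (c : Char) (j : Nat) :
    [c] <+: cs.drop j ↔ cs[j]? = some c := by
  rw [← List.head?_drop]
  constructor
  · rintro ⟨t, ht⟩; rw [← ht]; rfl
  · intro h
    rcases hd : cs.drop j with _ | ⟨a, t⟩
    · simp [hd] at h
    · simp [hd] at h; exact ⟨t, by simp [h]⟩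

theorem pvSingleton_infix (l : List Char) (c : Char) : [c] <:+: l ↔ c ∈ l := by
  constructor
  · intro h; exact h.sublist.subset (by simp)
  · intro h
    rcases List.mem_iff_append.mp h with ⟨s, t, rfl⟩
    exact ⟨s, t, by simp⟩

-- single-char findFrom (no end bound) from a nonnegative in-range Int start
theorem pvFindFrom_char_spec (cs : List Char) (c : Char) (i : Int)
    (h0 : 0 ≤ i) (hn : i ≤ (cs.length : Int)) :
    (PySem.Chars.findFrom cs [c] i none = -1 →
        ∀ j : Nat, i ≤ (j : Int) → j < cs.length → cs[j]? ≠ some c) ∧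
    (0 ≤ PySem.Chars.findFrom cs [c] i none →
        i ≤ PySem.Chars.findFrom cs [c] i none ∧
        (PySem.Chars.findFrom cs [c] i none).toNat < cs.length ∧
        cs[(PySem.Chars.findFrom cs [c] i none).toNat]? = some c ∧
        ∀ j : Nat, i ≤ (j : Int) → (j : Int) < PySem.Chars.findFrom cs [c] i none →
          cs[j]? ≠ some c) := by
  obtain ⟨k, rfl⟩ : ∃ k : Nat, (k : Int) = i := ⟨i.toNat, by omega⟩
  have hk : k ≤ cs.length := by exact_mod_cast hn
  constructor
  · intro hneg j hij hj hc
    rw [PySem.Chars.findFrom_natCast_eq_neg_one_iff cs [c] k hk] at hneg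
    apply hneg
    rw [pvSingleton_infix]
    have : (cs.drop k)[j - k]? = some c := by
      rw [List.getElem?_drop]
      have : k + (j - k) = j := by omega
      rw [this, hc]
    exact List.mem_of_getElem? this
  · intro hpos
    have hne : PySem.Chars.findFrom cs [c] (k : Int) none ≠ -1 := by omega
    obtain ⟨h1, h2, h3⟩ := PySem.Chars.findFrom_natCast_spec cs [c] k hk hne
    rw [pvSingleton_prefix_drop] at h2
    have hlt : (PySem.Chars.findFrom cs [c] (k : Int) none).toNat < cs.length := by
      by_contra hge
      rw [List.getElem?_eq_none (by omega)] at h2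
      simp at h2
    refine ⟨h1, hlt, h2, ?_⟩
    intro j hij hjlt hc
    apply h3 j (by exact_mod_cast hij) (by omega)
    rw [pvSingleton_prefix_drop]; exact hc

theorem pvFindFrom_neg_one_le (cs sub : List Char) (i : Int) :
    -1 ≤ PySem.Chars.findFrom cs sub i none := by
  unfold PySem.Chars.findFrom
  dsimp only
  set st := (if i < 0 then if i + (cs.length : Int) < 0 then 0 else i + (cs.length : Int) else i) with hst
  have h2 := PySem.Chars.neg_one_le_find
    (List.drop st.toNat (List.take ((cs.length : Int)).toNat cs)) sub
  split_ifs <;> omega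

-- findFrom with an end bound = findFrom without one on the truncated list
theorem pvFindFromEnd_eq_take (s sub : List Char) (i L : Int)
    (h0 : 0 ≤ i) (hL0 : 0 ≤ L) (hLn : L ≤ (s.length : Int)) :
    PySem.Chars.findFrom s sub i (some L) =
    PySem.Chars.findFrom (s.take L.toNat) sub i none := by
  unfold PySem.Chars.findFrom
  dsimp only
  have hlen : ((s.take L.toNat).length : Int) = L := by
    simp [List.length_take]
    omega
  rw [hlen]
  rw [if_neg (by omega : ¬ (s.length : Int) < L), if_neg (by omega : ¬ L < 0),
      if_neg (by omega : ¬ i < 0), if_neg (by omega : ¬ i < 0)]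
  rw [List.take_take]
  have : min L.toNat L.toNat = L.toNat := by omega
  rw [this]

-- single-char findFrom with end bound L
theorem pvFindFromEnd_char_spec (cs : List Char) (c : Char) (i L : Int)
    (h0 : 0 ≤ i) (hL0 : 0 ≤ L) (hLn : L ≤ (cs.length : Int)) (hiL : i ≤ L) :
    (PySem.Chars.findFrom cs [c] i (some L) = -1 →
        ∀ j : Nat, i ≤ (j : Int) → (j : Int) < L → cs[j]? ≠ some c) ∧
    (0 ≤ PySem.Chars.findFrom cs [c] i (some L) →
        i ≤ PySem.Chars.findFrom cs [c] i (some L) ∧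
        PySem.Chars.findFrom cs [c] i (some L) < L ∧
        cs[(PySem.Chars.findFrom cs [c] i (some L)).toNat]? = some c ∧
        ∀ j : Nat, i ≤ (j : Int) → (j : Int) < PySem.Chars.findFrom cs [c] i (some L) →
          cs[j]? ≠ some c) := by
  rw [pvFindFromEnd_eq_take cs [c] i L h0 hL0 hLn]
  have hlen : (cs.take L.toNat).length = L.toNat := by
    simp [List.length_take]; omega
  have hget : ∀ j : Nat, (j : Int) < L → (cs.take L.toNat)[j]? = cs[j]? := by
    intro j hj
    rw [List.getElem?_take_of_lt (by omega)]
  obtain ⟨hneg, hpos⟩ := pvFindFrom_char_spec (cs.take L.toNat) c i h0 (by omega)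
  constructor
  · intro hm j hj1 hj2
    rw [← hget j hj2]
    exact hneg hm j hj1 (by omega)
  · intro hp
    obtain ⟨a, b, cc, d⟩ := hpos hp
    refine ⟨a, by omega, ?_, ?_⟩
    · rw [← hget _ (by omega)]; exact cc
    · intro j hj1 hj2
      rw [← hget j (by omega)]
      exact d j hj1 hj2

theorem pvFindFromEnd_neg_one_le (cs sub : List Char) (i L : Int)
    (h0 : 0 ≤ i) (hL0 : 0 ≤ L) (hLn : L ≤ (cs.length : Int)) :
    -1 ≤ PySem.Chars.findFrom cs sub i (some L) := by
  rw [pvFindFromEnd_eq_take cs sub i L h0 hL0 hLn]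
  exact pvFindFrom_neg_one_le _ sub i

-- pvRunA skips a clean run: no backslash and no quote char in [i, i+d)
theorem pvRunA_clean (cs : List Char) (quote : String) (L : Int) (d : Nat) :
    ∀ i : Int, 0 ≤ i → i + d ≤ L → L ≤ (cs.length : Int) →
    (∀ j : Nat, i ≤ (j : Int) → (j : Int) < i + d →
        cs[j]? ≠ some '\\' ∧ ∀ c, cs[j]? = some c → String.singleton c ≠ quote) →
    pvRunA cs quote L i = pvRunA cs quote L (i + d) := by
  induction d with
  | zero => intro i _ _ _ _; norm_num
  | succ d ih =>
    intro i h0 hdL hL hclean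
    obtain ⟨k, rfl⟩ : ∃ k : Nat, (k : Int) = i := ⟨i.toNat, by omega⟩
    push_cast at hdL
    have hiL : (k : Int) < L := by omega
    have hk : k < cs.length := by omega
    have hget : PySem.List.pyGet? cs (k : Int) = some cs[k] := by
      rw [PySem.List.pyGet?_natCast, List.getElem?_eq_getElem hk]
    have hcl := hclean k (le_refl _) (by omega)
    rw [pvRunA, dif_pos hiL, hget]
    dsimp only
    have hnb : ¬ (cs[k] = '\\' ∧ (k : Int) + 1 < L) := by
      rintro ⟨h1, -⟩
      exact hcl.1 (by rw [List.getElem?_eq_getElem hk, h1])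
    have hnq : ¬ (String.singleton cs[k] = quote) :=
      hcl.2 _ (List.getElem?_eq_getElem hk)
    rw [if_neg hnb, if_neg hnq]
    have := ih ((k : Int) + 1) (by omega) (by omega) hL
      (fun j hj1 hj2 => hclean j (by omega) (by push_cast at hj2 ⊢; omega))
    rw [this]
    congr 1
    push_cast
    ring

-- one unfolding of pvRunA at a position holding a known character
theorem pvRunA_step (cs : List Char) (quote : String) (L i : Int) (c : Char)
    (hiL : i < L) (hget : PySem.List.pyGet? cs i = some c) :
    pvRunA cs quote L i =
      if c = '\\' ∧ i + 1 < L then pvRunA cs quote L (i + 2)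
      else if String.singleton c = quote then i + 1
      else pvRunA cs quote L (i + 1) := by
  rw [pvRunA, dif_pos hiL, hget]

theorem pvSingleton_eq_iff (c qc : Char) (q : String) (hq : q.toList = [qc]) :
    String.singleton c = q ↔ c = qc := by
  rw [← String.toList_inj, hq]
  simp

-- bundle the "clean run" hypothesis of pvRunA_clean from no-backslash / no-quote facts
theorem pvClean_of (cs : List Char) (quote : String) (qc : Char) (hq : quote.toList = [qc])
    (i : Int) (d : Nat)
    (hnb : ∀ j : Nat, i ≤ (j : Int) → (j : Int) < i + d → cs[j]? ≠ some '\\')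
    (hnq : ∀ j : Nat, i ≤ (j : Int) → (j : Int) < i + d → cs[j]? ≠ some qc) :
    ∀ j : Nat, i ≤ (j : Int) → (j : Int) < i + d →
      cs[j]? ≠ some '\\' ∧ ∀ c, cs[j]? = some c → String.singleton c ≠ quote := by
  intro j hj1 hj2
  refine ⟨hnb j hj1 hj2, fun c hc hs => hnq j hj1 hj2 ?_⟩
  rw [(pvSingleton_eq_iff c qc quote hq).mp hs] at hc
  exact hc

-- a string that is not a single character never equals a singleton
theorem pvSingletonNe (quote : String) (h : quote.toList.length ≠ 1) (c : Char) :
    String.singleton c ≠ quote := by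
  intro he
  apply h
  rw [← he]
  simp

-- A's loop returns length when no single character can equal quote
theorem pvRunA_no_match (cs : List Char) (quote : String) (L : Int)
    (hq : ∀ c : Char, String.singleton c ≠ quote) :
    ∀ i : Int, pvRunA cs quote L i = L := by
  intro i
  induction hd : (L - i).toNat using Nat.strong_induction_on generalizing i with
  | _ d ih =>
  rw [pvRunA]
  split_ifs with hiL
  · cases hget : PySem.List.pyGet? cs i with
    | none => rfl
    | some c =>
      simp only [hq c, if_false]
      split_ifs with h1
      · exact ih (L - (i + 2)).toNat (by omega) _ rfl
      · exact ih (L - (i + 1)).toNat (by omega) _ rfl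
  · rfl

-- find fails at every position ≥ i0 when the pattern is not an infix of the window
theorem pvNoInfix_find (cs sub : List Char) (i L i0 : Int)
    (hiL : i < L) (hLn : L ≤ (cs.length : Int)) (hi00 : 0 ≤ i0) (hi0 : i0 ≤ i)
    (hninf : ¬ sub <:+: (cs.take L.toNat).drop i0.toNat) :
    PySem.Chars.findFrom cs sub i (some L) = -1 := by
  rw [pvFindFromEnd_eq_take cs sub i L (by omega) (by omega) hLn]
  have hlen : (cs.take L.toNat).length = L.toNat := by
    simp [List.length_take]; omega
  rw [show i = ((i.toNat : Nat) : Int) by omega,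
      PySem.Chars.findFrom_natCast_eq_neg_one_iff (cs.take L.toNat) sub i.toNat (by omega)]
  intro hinf
  apply hninf
  have hdd : ((cs.take L.toNat).drop i0.toNat).drop (i.toNat - i0.toNat)
      = (cs.take L.toNat).drop i.toNat := by
    rw [List.drop_drop]
    congr 1
    omega
  rw [← hdd] at hinf
  exact hinf.trans (List.drop_suffix _ _).isInfix

-- B's loop returns length when the quote string is not an infix of the window
theorem pvRunB_no_quote (code quote : String) (L : Int)
    (hL : L ≤ (code.toList.length : Int)) (i0 : Int) (hi00 : 0 ≤ i0)
    (hninf : ¬ quote.toList <:+: ((code.toList.take L.toNat).drop i0.toNat)) :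
    ∀ i : Int, i0 ≤ i → pvRunB code quote L i = L := by
  intro i
  induction hd : (L - i).toNat using Nat.strong_induction_on generalizing i with
  | _ d ih =>
  intro hi0
  rw [pvRunB]
  split_ifs with hiL hc1 hb
  · exfalso
    have hqneg := pvNoInfix_find code.toList quote.toList i L i0 hiL hL hi00 hi0 hninf
    rw [PySem.Str.findFrom_eq] at hc1
    exact hc1.1 hqneg
  · rfl
  · rw [PySem.Str.findFrom_eq] at hb ⊢
    rcases pvFindFrom_some_ge code.toList ("\\").toList i L hb with hg | hg
    · exact ih (L - (PySem.Chars.findFrom code.toList ("\\").toList i (some L) + 2)).toNat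
        (by omega) _ rfl (by omega)
    · omega
  · rfl

-- main equivalence of the two loops, for a single-char quote
theorem pvRunB_eq_pvRunA (code : String) (quote : String) (qc : Char)
    (hq : quote.toList = [qc]) (L : Int) (hL : L ≤ (code.toList.length : Int)) :
    ∀ i : Int, 0 ≤ i → pvRunB code quote L i = pvRunA code.toList quote L i := by
  intro i
  induction hd : (L - i).toNat using Nat.strong_induction_on generalizing i with
  | _ d ih =>
  intro h0
  by_cases hiL : i < L
  case neg =>
    rw [pvRunB, dif_neg hiL, pvRunA, dif_neg hiL]
  case pos =>
  have hL0 : 0 ≤ L := by omega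
  rw [pvRunB, dif_pos hiL]
  rw [PySem.Str.findFrom_eq, PySem.Str.findFrom_eq, hq,
      show ("\\" : String).toList = ['\\'] from rfl]
  set q := PySem.Chars.findFrom code.toList [qc] i (some L) with hqdef
  set b := PySem.Chars.findFrom code.toList ['\\'] i (some L) with hbdef
  have hqspec := pvFindFromEnd_char_spec code.toList qc i L h0 hL0 hL (by omega)
  have hbspec := pvFindFromEnd_char_spec code.toList '\\' i L h0 hL0 hL (by omega)
  rw [← hqdef] at hqspec
  rw [← hbdef] at hbspec
  have hqm1 : -1 ≤ q := pvFindFromEnd_neg_one_le code.toList [qc] i L h0 hL0 hL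
  have hbm1 : -1 ≤ b := pvFindFromEnd_neg_one_le code.toList ['\\'] i L h0 hL0 hL
  by_cases hc1 : q ≠ -1 ∧ (b = -1 ∨ q < b)
  case pos =>
    rw [if_pos hc1]
    obtain ⟨hiq, hqL, hqat, hqmin⟩ := hqspec.2 (by omega)
    -- no backslash anywhere in [i, q)
    have hnb : ∀ j : Nat, i ≤ (j : Int) → (j : Int) < q → code.toList[j]? ≠ some '\\' := by
      intro j hj1 hj2
      rcases hc1.2 with hb | hb
      · exact hbspec.1 hb j hj1 (by omega)
      · exact (hbspec.2 (by omega)).2.2.2 j hj1 (by omega)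
    have hclean := pvClean_of code.toList quote qc hq i (q - i).toNat
      (fun j h1 h2 => hnb j h1 (by omega))
      (fun j h1 h2 => hqmin j h1 (by omega))
    have hskip := pvRunA_clean code.toList quote L (q - i).toNat i h0 (by omega) hL hclean
    rw [hskip, show i + ((q - i).toNat : Int) = q by omega]
    have hget : PySem.List.pyGet? code.toList q = some qc := by
      rw [show q = ((q.toNat : Nat) : Int) by omega, PySem.List.pyGet?_natCast]
      exact hqat
    rw [pvRunA_step code.toList quote L q qc hqL hget]
    have hqcnb : ¬ (qc = '\\' ∧ q + 1 < L) := by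
      rintro ⟨rfl, -⟩
      -- then code[q] is a backslash at or before any backslash: contradicts hc1.2
      rcases hc1.2 with hb | hb
      · exact hbspec.1 hb q.toNat (by omega) (by omega) hqat
      · exact (hbspec.2 (by omega)).2.2.2 q.toNat (by omega) (by omega) hqat
    rw [if_neg hqcnb, if_pos ((pvSingleton_eq_iff qc qc quote hq).mpr rfl)]
  case neg =>
    rw [if_neg hc1]
    -- ¬hc1: q = -1 ∨ (b ≠ -1 ∧ b ≤ q)
    by_cases hb : b = -1
    · rw [dif_pos hb]
      have hqv : q = -1 := by
        by_contra hne
        exact hc1 ⟨hne, Or.inl hb⟩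
      have hclean := pvClean_of code.toList quote qc hq i (L - i).toNat
        (fun j h1 h2 => hbspec.1 hb j h1 (by omega))
        (fun j h1 h2 => hqspec.1 hqv j h1 (by omega))
      have hskip := pvRunA_clean code.toList quote L (L - i).toNat i h0 (by omega) hL hclean
      rw [hskip, show i + ((L - i).toNat : Int) = L by omega, pvRunA,
          dif_neg (by omega : ¬ L < L)]
    · rw [dif_neg hb]
      obtain ⟨hib, hbL, hbat, hbmin⟩ := hbspec.2 (by omega)
      -- no quote char in [i, b)
      have hnq : ∀ j : Nat, i ≤ (j : Int) → (j : Int) < b → code.toList[j]? ≠ some qc := by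
        intro j hj1 hj2
        by_cases hqv : q = -1
        · exact hqspec.1 hqv j hj1 (by omega)
        · have hbq : b ≤ q := by
            by_contra hlt
            exact hc1 ⟨hqv, Or.inr (by omega)⟩
          exact (hqspec.2 (by omega)).2.2.2 j hj1 (by omega)
      have hclean := pvClean_of code.toList quote qc hq i (b - i).toNat
        (fun j h1 h2 => hbmin j h1 (by omega))
        (fun j h1 h2 => hnq j h1 (by omega))
      have hskip := pvRunA_clean code.toList quote L (b - i).toNat i h0 (by omega) hL hclean
      have hgetb : PySem.List.pyGet? code.toList b = some '\\' := by
        rw [show b = ((b.toNat : Nat) : Int) by omega, PySem.List.pyGet?_natCast]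
        exact hbat
      rw [hskip, show i + ((b - i).toNat : Int) = b by omega,
          pvRunA_step code.toList quote L b '\\' hbL hgetb]
      by_cases hbl : b + 1 < L
      · rw [if_pos ⟨rfl, hbl⟩]
        exact ih (L - (b + 2)).toNat (by omega) (b + 2) rfl (by omega)
      · rw [if_neg (fun hcon : ('\\' = '\\' ∧ b + 1 < L) => hbl hcon.2)]
        have hBend : pvRunB code quote L (b + 2) = L := by
          rw [pvRunB, dif_neg (by omega : ¬ b + 2 < L)]
        rw [hBend]
        split_ifs with hsq
        · omega
        · rw [pvRunA, dif_neg (by omega : ¬ b + 1 < L)]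

-- ===== VERDICT (by name: the statement is the Claim_ definition above) =====
theorem find_string_end_py_spec : Claim_equal_find_string_end_py := by
  intro code start quote length _hdom hpre
  obtain ⟨hs, hl, hq1⟩ := hpre
  have hlen : length ≤ (code.toList.length : Int) := by
    simpa [PySem.Str.len] using hl
  unfold Spec_find_string_end_py find_string_end_py find_string_end_py_alt
  rw [pvLoopA_eq_run code.toList quote length _ (start + 1) le_rfl,
      pvLoopB_eq_run code quote length _ (start + 1) le_rfl]
  by_cases hq : quote.toList.length = 1
  · obtain ⟨qc, hqq⟩ := List.length_eq_one_iff.mp hq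
    exact (pvRunB_eq_pvRunA code quote qc hqq length hlen (start + 1) (by omega)).symm
  · have hninf : ¬ quote.toList <:+: ((code.toList.take length.toNat).drop (start + 1).toNat) := by
      rcases hq1 with h1 | h1
      · exfalso
        apply hq
        have : ((quote.toList.length : Int)) = 1 := by simpa [PySem.Str.len] using h1
        exact_mod_cast this
      · exact h1
    rw [pvRunA_no_match code.toList quote length (pvSingletonNe quote hq) (start + 1),
        pvRunB_no_quote code quote length hlen (start + 1) (by omega) hninf (start + 1) le_rfl]
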